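-- pv_equiv track=rewrite | github.com/bebosudo/pytokio | tokio/connectors/hpss.py | _find_columns
-- ===== SOURCE A (Python) =====
-- def _find_columns(line, sep="=", gap=' ', strict=False):
--     """Determine the column start/end positions for a header line separator
--
--     Takes a line separator such as the one denoted below:
--
--         Host             Users      IO_GB
--         ===============  =====  =========
--         heart               53   148740.6
--
--     and returns a tuple of (start index, end index) values that can be used to
--     slice table rows into column entries.
--
--     Args:
--         line (str): Text comprised of separator characters and spaces that
--             define the extents of columns
--         sep (str): The character used to draw the column lines
--         gap (str): The character separating ``sep`` characters
--         strict (bool): If true, restrict column extents to only include sep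
--             characters and not the spaces that follow them.
--
--     Returns:
--         list of tuples:
--     """
--
--     columns = []
--
--     # if line is not comprised exclusively of separators and gaps, it is not a
--     # valid heading line
--     if line.replace(sep, 'X').replace(gap, 'X').strip('X') != "":
--         return columns
--
--     if strict:
--         col_start = None
--     else:
--         col_start = 0
--
--     for index, char in enumerate(line):
--         if strict:
--             # col_start == None == looking for start of a new column
--             if col_start is None and char == sep:
--                 col_start = index
--             # if this is the end of an inter-column gap
--             elif index > 0 and char == gap and line[index - 1] == sep:
--                 columns.append((col_start, index - col_start))
--                 col_start = None
--         else:
--             # if this is the end of an inter-column gap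
--             if index > 0 and char == gap and line[index - 1] == sep:
--                 columns.append((col_start, index - col_start))
--                 col_start = index
--
--     if line and line[-1] == sep and col_start is not None:
--         columns.append((col_start, len(line) - col_start))
--
--     return columns
-- ===== SOURCE B (Python) =====
-- def _find_columns(line, sep="=", gap=' ', strict=False):
--     # Run/boundary arithmetic instead of a per-character state machine:
--     # collect the "close" indices (a gap char right after a sep char) once,
--     # then pair column starts with closes by index arithmetic.
--     if line.replace(sep, 'X').replace(gap, 'X').strip('X') != "":
--         return []
--     n = len(line)
--     closes = [i for i in range(1, n) if line[i] == gap and line[i - 1] == sep]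
--     tail = bool(line) and line[-1] == sep
--     bounds = closes + [n] if tail else closes
--     if strict:
--         cols = []
--         lo = 0
--         for hi in bounds:
--             s = [i for i in range(lo, hi) if line[i] == sep][0]
--             cols.append((s, hi - s))
--             lo = hi + 1
--         return cols
--     return [(s, e - s) for s, e in zip([0] + closes, bounds)]
-- ===== Notes on version B (the rewrite author's own statement) =====
-- stated objective: alternative
-- what changed: Replaces the per-character open/close state machine with one pass that collects all column-close indices (a gap char right after a sep char) and then builds the columns by pairing starts with closes via index arithmetic (non-strict: zip of boundary lists; strict: first-separator lookup inside each segment).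
-- outside the precondition, e.g. on _find_columns('==', '=', '=', True): A returns [(0, 1)], B raises IndexError
import Mathlib
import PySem

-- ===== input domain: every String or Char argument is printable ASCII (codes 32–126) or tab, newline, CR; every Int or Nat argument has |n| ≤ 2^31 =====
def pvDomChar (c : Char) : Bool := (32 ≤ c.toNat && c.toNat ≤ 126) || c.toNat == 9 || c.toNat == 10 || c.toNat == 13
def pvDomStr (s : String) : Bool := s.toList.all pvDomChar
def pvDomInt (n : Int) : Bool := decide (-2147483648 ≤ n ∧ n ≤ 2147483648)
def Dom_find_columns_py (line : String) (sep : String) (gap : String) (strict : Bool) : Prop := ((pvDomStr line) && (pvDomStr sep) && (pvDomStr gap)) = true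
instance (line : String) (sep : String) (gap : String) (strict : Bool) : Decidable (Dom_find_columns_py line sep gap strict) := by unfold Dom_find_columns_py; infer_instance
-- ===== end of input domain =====

-- B replaces A's per-character open/close state machine with one collection of the
-- column-close indices followed by index arithmetic (an alternative of similar cost).


-- ===== PORT A =====
-- Python's `line[i] == s` for a string s: the one-char string at index i equals s
-- (exact also when s has length ≠ 1: then it is never equal; false on out-of-range i,
-- which is only evaluated behind Python's short-circuit guards).
def pvCharAt (cs : List Char) (i : Int) (s : List Char) : Bool :=
  match PySem.List.pyGet? cs i with
  | some c => [c] == s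
  | none => false

-- literal transliteration of A: validity guard, then a per-character fold carrying
-- (columns, col_start), then the final append.
def find_columns_py (line : String) (sep : String) (gap : String) (strict : Bool) : List (Int × Int) :=
  if PySem.Str.stripChars (PySem.Str.replace (PySem.Str.replace line sep "X") gap "X") "X" ≠ "" then
    []
  else
    let cs := line.toList
    let init : List (Int × Int) × Option Int := ([], if strict then none else some 0)
    let st := (PySem.List.enumerate cs 0).foldl
      (fun (st : List (Int × Int) × Option Int) (ic : Int × Char) =>
        let index := ic.1
        let char := ic.2
        if strict then
          if st.2 = none ∧ [char] = sep.toList then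
            (st.1, some index)
          else if 0 < index ∧ [char] = gap.toList ∧ pvCharAt cs (index - 1) sep.toList then
            -- Python appends (col_start, index - col_start); col_start is provably not
            -- None here (getD 0 is an arbitrary value for the unreachable none case)
            (st.1 ++ [(st.2.getD 0, index - st.2.getD 0)], none)
          else st
        else
          if 0 < index ∧ [char] = gap.toList ∧ pvCharAt cs (index - 1) sep.toList then
            (st.1 ++ [(st.2.getD 0, index - st.2.getD 0)], some index)
          else st) init
    if cs ≠ [] ∧ pvCharAt cs (-1) sep.toList ∧ st.2 ≠ none then
      st.1 ++ [(st.2.getD 0, (cs.length : Int) - st.2.getD 0)]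
    else
      st.1

-- ===== PORT B =====
-- literal transliteration of B (Source B): same validity guard; collect the close indices,
-- then build the columns by pairing boundary lists.
def find_columns_py_alt (line : String) (sep : String) (gap : String) (strict : Bool) : List (Int × Int) :=
  if PySem.Str.stripChars (PySem.Str.replace (PySem.Str.replace line sep "X") gap "X") "X" ≠ "" then
    []
  else
    let cs := line.toList
    let n : Int := (cs.length : Int)
    let closes := (PySem.List.pyRange 1 n 1).filter
      (fun i => pvCharAt cs i gap.toList && pvCharAt cs (i - 1) sep.toList)
    let tail := decide (cs ≠ []) && pvCharAt cs (-1) sep.toList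
    let bounds := if tail then closes ++ [n] else closes
    if strict then
      (bounds.foldl
        (fun (st : List (Int × Int) × Int) (hi : Int) =>
          -- Python: s = [i for i in range(lo, hi) if line[i] == sep][0]
          -- (the [0] would raise on an empty list; getD 0 is arbitrary there)
          let s := (PySem.List.pyGet?
            ((PySem.List.pyRange st.2 hi 1).filter (fun i => pvCharAt cs i sep.toList)) 0).getD 0
          (st.1 ++ [(s, hi - s)], hi + 1)) ([], 0)).1
    else
      ((0 :: closes).zip bounds).map (fun p => (p.1, p.2 - p.1))

-- ===== PRECONDITION & SPEC =====
-- Pre_ excludes only the degenerate calls with strict=True and a one-character sep equal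
-- to gap that occurs doubled somewhere in line: there A's elif chain alternates one-wide
-- columns as an artefact of its branch order (a corner no caller of a header parser
-- specifies), while B's per-segment separator lookup raises IndexError.
def Pre_find_columns_py (line : String) (sep : String) (gap : String) (strict : Bool) : Prop :=
  strict = true → sep = gap → sep.toList.length = 1 → PySem.Str.isIn (sep ++ sep) line = false
instance (line : String) (sep : String) (gap : String) (strict : Bool) : Decidable (Pre_find_columns_py line sep gap strict) := by unfold Pre_find_columns_py; infer_instance

def pvWitness_find_columns_py : String × String × String × Bool := ("=====  ===", "=", " ", true)

def Spec_find_columns_py (line : String) (sep : String) (gap : String) (strict : Bool) (out : List (Int × Int)) : Prop := out = find_columns_py_alt line sep gap strict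
instance (line : String) (sep : String) (gap : String) (strict : Bool) (out : List (Int × Int)) : Decidable (Spec_find_columns_py line sep gap strict out) := by unfold Spec_find_columns_py; infer_instance

-- ===== CLAIM (what is proved, stated in full; the proofs are below) =====
def Claim_equal_find_columns_py : Prop := ∀ (line : String) (sep : String) (gap : String) (strict : Bool), Dom_find_columns_py line sep gap strict → Pre_find_columns_py line sep gap strict → Spec_find_columns_py line sep gap strict (find_columns_py line sep gap strict)


-- ===== proof-side definitions (used only by the lemmas below) =====

-- the close predicate (a gap character right after a separator character)
def pvQ (cs sepL gapL : List Char) (i : Int) : Bool :=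
  decide (0 < i) && pvCharAt cs i gapL && pvCharAt cs (i - 1) sepL

-- the final-column condition (line nonempty and ending in a separator)
def pvTail (cs sepL : List Char) : Bool := decide (cs ≠ []) && pvCharAt cs (-1) sepL

-- first separator index in [lo, hi)
def pvFirst (cs sepL : List Char) (lo hi : Int) : Option Int :=
  ((PySem.List.pyRange lo hi).filter (fun i => pvCharAt cs i sepL)).head?

-- B's strict loop, written as structural recursion over the bounds list
def pvBs (cs sepL : List Char) : Int → List Int → List (Int × Int)
  | _, [] => []
  | lo, hi :: bs =>
    let s := (PySem.List.pyGet?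
      ((PySem.List.pyRange lo hi).filter (fun i => pvCharAt cs i sepL)) 0).getD 0
    (s, hi - s) :: pvBs cs sepL (hi + 1) bs

-- B's non-strict zip, written as structural recursion over the boundary list
def pvNs : Int → List Int → List (Int × Int)
  | _, [] => []
  | s0, c :: cl => (s0, c - s0) :: pvNs c cl

-- A's per-character step (strict), as a function of the index alone
def pvStepS (cs sepL gapL : List Char) (st : List (Int × Int) × Option Int) (i : Int) :
    List (Int × Int) × Option Int :=
  if st.2 = none ∧ pvCharAt cs i sepL = true then (st.1, some i)
  else if 0 < i ∧ pvCharAt cs i gapL = true ∧ pvCharAt cs (i - 1) sepL = true then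
    (st.1 ++ [(st.2.getD 0, i - st.2.getD 0)], none)
  else st

-- A's per-character step (non-strict), as a function of the index alone
def pvStepN (cs sepL gapL : List Char) (st : List (Int × Int) × Option Int) (i : Int) :
    List (Int × Int) × Option Int :=
  if 0 < i ∧ pvCharAt cs i gapL = true ∧ pvCharAt cs (i - 1) sepL = true then
    (st.1 ++ [(st.2.getD 0, i - st.2.getD 0)], some i)
  else st

-- A's final append after the loop
def pvFin (cs sepL : List Char) (st : List (Int × Int) × Option Int) : List (Int × Int) :=
  if cs ≠ [] ∧ pvCharAt cs (-1) sepL = true ∧ st.2 ≠ none then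
    st.1 ++ [(st.2.getD 0, (cs.length : Int) - st.2.getD 0)]
  else st.1
-- ===== LEMMAS AND PROOFS =====

-- basic facts about pvCharAt / pyGet?
theorem pvGet0 {α : Type} (l : List α) : PySem.List.pyGet? l 0 = l.head? := by
  cases l <;> simp [PySem.List.pyGet?, PySem.List.pyIdx?]

theorem pvCharAt_neg_one (cs : List Char) (s : List Char) (h : cs ≠ []) :
    pvCharAt cs (-1) s = pvCharAt cs ((cs.length : Int) - 1) s := by
  have h1 : 1 ≤ cs.length := List.length_pos_iff.mpr h
  unfold pvCharAt
  have : PySem.List.pyGet? cs (-1) = PySem.List.pyGet? cs ((cs.length : Int) - 1) := by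
    simp [PySem.List.pyGet?, PySem.List.pyIdx?, h1]
  rw [this]

theorem pvCharAt_conflict (cs : List Char) (i : Int) (s g : List Char)
    (hs : pvCharAt cs i s = true) (hg : pvCharAt cs i g = true) : s = g := by
  unfold pvCharAt at hs hg
  cases h : PySem.List.pyGet? cs i with
  | none => rw [h] at hs; cases hs
  | some c =>
    rw [h] at hs hg
    simp at hs hg
    rw [← hs, hg]

theorem pvCharAt_getD (cs : List Char) (i : Int) (d : Char) (s : List Char)
    (h0 : 0 ≤ i) (h1 : i < (cs.length : Int)) :
    ([PySem.List.pyGetD cs i d] = s) = (pvCharAt cs i s = true) := by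
  have ht : i.toNat < cs.length := by omega
  have hg : PySem.List.pyGet? cs i = some cs[i.toNat] := by
    simp [PySem.List.pyGet?, PySem.List.pyIdx?, h0, h1]
  unfold pvCharAt
  rw [hg]
  have hd : PySem.List.pyGetD cs i d = cs[i.toNat] := by
    simp [PySem.List.pyGetD, h0, h1]
  rw [hd]
  simp

theorem pvCharAt_some (cs s : List Char) (i : Int) (h0 : 0 ≤ i) (h : pvCharAt cs i s = true) :
    ∃ c, cs[i.toNat]? = some c ∧ s = [c] := by
  unfold pvCharAt at h
  cases hp : PySem.List.pyGet? cs i with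
  | none => rw [hp] at h; cases h
  | some c =>
    rw [hp] at h
    refine ⟨c, ?_, Eq.symm (by simpa using h)⟩
    simp [PySem.List.pyGet?, PySem.List.pyIdx?, h0] at hp
    by_cases hlt : i < (cs.length : Int)
    · simpa [hlt] using hp
    · simp [hlt] at hp

theorem pvAdj (cs : List Char) (j : Nat) (c : Char) (hj : 1 ≤ j)
    (h1 : cs[j - 1]? = some c) (h2 : cs[j]? = some c) : [c, c] <:+: cs := by
  have hl1 : j - 1 < cs.length := (List.getElem?_eq_some_iff.mp h1).1
  have hl2 : j < cs.length := (List.getElem?_eq_some_iff.mp h2).1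
  have e1 : cs[j - 1]'hl1 = c := by simpa [List.getElem?_eq_getElem hl1] using h1
  have e2 : cs[j]'hl2 = c := by simpa [List.getElem?_eq_getElem hl2] using h2
  have hdrop : cs.drop (j - 1) = c :: c :: cs.drop (j + 1) := by
    rw [List.drop_eq_getElem_cons hl1, show j - 1 + 1 = j from by omega,
        List.drop_eq_getElem_cons hl2, e1, e2]
  have hpre : [c, c] <+: cs.drop (j - 1) := by rw [hdrop]; exact ⟨cs.drop (j + 1), rfl⟩
  exact hpre.isInfix.trans (List.drop_suffix _ _).isInfix

-- pvFirst: the first separator index in [lo, hi)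
theorem pvFirst_empty (cs sepL : List Char) (lo : Int) : pvFirst cs sepL lo lo = none := by
  simp [pvFirst, PySem.List.pyRange_one_eq_nil (le_refl lo)]

theorem pvFirst_snoc (cs sepL : List Char) (lo k : Int) (h : lo ≤ k) :
    pvFirst cs sepL lo (k + 1)
      = (pvFirst cs sepL lo k).or (if pvCharAt cs k sepL = true then some k else none) := by
  unfold pvFirst
  rw [PySem.List.pyRange_one_succ_right h, List.filter_append, List.head?_append]
  congr 1
  by_cases hc : pvCharAt cs k sepL = true <;> simp [hc]

theorem pvFirst_mem (cs sepL : List Char) (lo hi j : Int)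
    (h1 : lo ≤ j) (h2 : j < hi) (h3 : pvCharAt cs j sepL = true) :
    pvFirst cs sepL lo hi ≠ none := by
  unfold pvFirst
  rw [Ne, List.head?_eq_none_iff]
  intro hnil
  have : j ∈ (PySem.List.pyRange lo hi).filter (fun i => pvCharAt cs i sepL) := by
    rw [List.mem_filter, PySem.List.mem_pyRange_one]
    exact ⟨⟨h1, h2⟩, h3⟩
  rw [hnil] at this
  cases this

-- B's strict fold equals pvBs
theorem pvFoldB (cs sepL : List Char) :
    ∀ (bs : List Int) (cols : List (Int × Int)) (lo : Int),
    (bs.foldl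
      (fun (st : List (Int × Int) × Int) (hi : Int) =>
        let s := (PySem.List.pyGet?
          ((PySem.List.pyRange st.2 hi).filter (fun i => pvCharAt cs i sepL)) 0).getD 0
        (st.1 ++ [(s, hi - s)], hi + 1)) (cols, lo)).1
      = cols ++ pvBs cs sepL lo bs := by
  intro bs
  induction bs with
  | nil => intro cols lo; simp [pvBs]
  | cons hi bs ih =>
    intro cols lo
    simp only [List.foldl_cons, pvBs, ih, List.append_assoc, List.singleton_append]

-- B's non-strict zip-map equals pvNs
theorem pvZipNs :
    ∀ (cl ext : List Int) (s0 : Int), ext.length ≤ 1 →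
    ((s0 :: cl).zip (cl ++ ext)).map (fun p => (p.1, p.2 - p.1)) = pvNs s0 (cl ++ ext) := by
  intro cl
  induction cl with
  | nil =>
    intro ext s0 hlen
    match ext with
    | [] => simp [pvNs]
    | [x] => simp [pvNs]
  | cons c cl ih =>
    intro ext s0 hlen
    simp only [List.cons_append, List.zip_cons_cons, List.map_cons, pvNs]
    rw [ih ext c hlen]

-- closes collected from [0,n) with the index>0 guard = closes collected from [1,n)
theorem pvCloses (cs sepL gapL : List Char) (n : Int) :
    (PySem.List.pyRange 0 n).filter (pvQ cs sepL gapL)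
      = (PySem.List.pyRange 1 n).filter (fun i => pvCharAt cs i gapL && pvCharAt cs (i - 1) sepL) := by
  rcases (by omega : n ≤ 0 ∨ 0 < n) with hn | hn
  · rw [PySem.List.pyRange_one_eq_nil hn, PySem.List.pyRange_one_eq_nil (by omega : n ≤ 1)]
    rfl
  · rw [PySem.List.pyRange_one_cons hn]
    rw [List.filter_cons_of_neg (by simp [pvQ])]
    norm_num
    exact List.filter_congr (fun i hi => by
      have h0 : (0 : Int) < i := by
        have := (PySem.List.mem_pyRange_one.mp hi).1; omega
      simp [pvQ, h0])

-- main loop invariant, strict mode: A's scan from position k, with col_start the first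
-- separator in [lo, k), produces B's segment decomposition of the remaining closes
theorem pvMS (cs sepL gapL : List Char) (hsg : sepL ≠ gapL) :
    ∀ (m : Nat) (k lo : Int) (cols : List (Int × Int)),
    k + m = (cs.length : Int) → 0 ≤ lo → lo ≤ k →
    (lo = 0 ∨ pvCharAt cs (lo - 1) gapL = true) →
    pvFin cs sepL ((PySem.List.pyRange k (cs.length : Int)).foldl (pvStepS cs sepL gapL)
        (cols, pvFirst cs sepL lo k))
      = cols ++ pvBs cs sepL lo
          (((PySem.List.pyRange k (cs.length : Int)).filter (pvQ cs sepL gapL))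
            ++ (if pvTail cs sepL = true then [(cs.length : Int)] else [])) := by
  intro m
  induction m with
  | zero =>
    intro k lo cols hk h0lo hlok hloprev
    have hkn : k = (cs.length : Int) := by omega
    subst hkn
    rw [PySem.List.pyRange_one_eq_nil (le_refl _)]
    by_cases ht : pvTail cs sepL = true
    · have ht' : cs ≠ [] ∧ pvCharAt cs (-1) sepL = true := by simpa [pvTail] using ht
      have hlast : pvCharAt cs ((cs.length : Int) - 1) sepL = true := by
        rw [← pvCharAt_neg_one cs sepL ht'.1]; exact ht'.2
      have hlt : lo < (cs.length : Int) := by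
        rcases (by omega : lo < (cs.length : Int) ∨ lo = (cs.length : Int)) with h | h
        · exact h
        · exfalso
          rcases hloprev with h0 | hgapprev
          · exact ht'.1 (List.length_eq_zero_iff.mp (by omega))
          · rw [h] at hgapprev
            exact hsg (pvCharAt_conflict cs ((cs.length : Int) - 1) sepL gapL hlast hgapprev)
      have hne : pvFirst cs sepL lo (cs.length : Int) ≠ none :=
        pvFirst_mem cs sepL lo _ ((cs.length : Int) - 1) (by omega) (by omega) hlast
      obtain ⟨sv, hsv⟩ := Option.ne_none_iff_exists'.mp hne
      simp only [List.foldl_nil, List.filter_nil, List.nil_append, if_pos ht, pvFin]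
      rw [if_pos ⟨ht'.1, ht'.2, by rw [hsv]; simp⟩]
      have hsv' := hsv
      simp only [pvFirst] at hsv'
      simp [pvBs, pvGet0, hsv', hsv]
    · have ht' : ¬(cs ≠ [] ∧ pvCharAt cs (-1) sepL = true ∧
          pvFirst cs sepL lo (cs.length : Int) ≠ none) := by
        simp [pvTail] at ht
        intro h
        exact absurd (ht h.1) (by simp [h.2.1])
      simp only [List.foldl_nil, List.filter_nil, List.nil_append, if_neg ht, pvFin]
      rw [if_neg ht']
      simp [pvBs]
  | succ m ih =>
    intro k lo cols hk h0lo hlok hloprev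
    have hkn : k < (cs.length : Int) := by omega
    rw [PySem.List.pyRange_one_cons hkn, List.foldl_cons, List.filter_cons]
    by_cases ha : pvFirst cs sepL lo k = none ∧ pvCharAt cs k sepL = true
    · -- a separator opens a column at k
      have hgapk : pvCharAt cs k gapL = false := by
        cases hgk : pvCharAt cs k gapL
        · rfl
        · exact absurd (pvCharAt_conflict cs k sepL gapL ha.2 hgk) hsg
      have hq : pvQ cs sepL gapL k = false := by simp [pvQ, hgapk]
      have hstep : pvStepS cs sepL gapL (cols, pvFirst cs sepL lo k) k = (cols, some k) := by
        simp [pvStepS, ha.1, ha.2]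
      have hfirst : pvFirst cs sepL lo (k + 1) = some k := by
        rw [pvFirst_snoc cs sepL lo k hlok, ha.1, if_pos ha.2]
        rfl
      rw [hstep, ← hfirst, ih (k + 1) lo cols (by omega) h0lo (by omega) hloprev]
      simp [hq]
    · by_cases hb : 0 < k ∧ pvCharAt cs k gapL = true ∧ pvCharAt cs (k - 1) sepL = true
      · -- a gap after a separator closes the column at k
        have hlo : lo ≤ k - 1 := by
          rcases (by omega : lo ≤ k - 1 ∨ lo = k) with h | h
          · exact h
          · exfalso
            rcases hloprev with h0 | hgapprev
            · omega
            · rw [h] at hgapprev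
              exact hsg (pvCharAt_conflict cs (k - 1) sepL gapL hb.2.2 hgapprev)
        have hne : pvFirst cs sepL lo k ≠ none :=
          pvFirst_mem cs sepL lo k (k - 1) hlo (by omega) hb.2.2
        obtain ⟨sv, hsv⟩ := Option.ne_none_iff_exists'.mp hne
        have hq : pvQ cs sepL gapL k = true := by simp [pvQ, hb.1, hb.2.1, hb.2.2]
        have hstep : pvStepS cs sepL gapL (cols, pvFirst cs sepL lo k) k
            = (cols ++ [(sv, k - sv)], none) := by
          simp [pvStepS, hsv, hb]
        rw [hstep,
          show (none : Option Int) = pvFirst cs sepL (k + 1) (k + 1) from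
            (pvFirst_empty cs sepL (k + 1)).symm,
          ih (k + 1) (k + 1) (cols ++ [(sv, k - sv)]) (by omega) (by omega) (le_refl _)
            (Or.inr (by rw [show k + 1 - (1 : Int) = k from by ring]; exact hb.2.1))]
        have hsv' := hsv
        simp only [pvFirst] at hsv'
        simp [hq, pvBs, pvGet0, hsv', List.append_assoc]
      · -- no event at k: the state is unchanged
        have hq : pvQ cs sepL gapL k = false := by
          by_contra h
          rw [Bool.not_eq_false] at h
          simp [pvQ] at h
          exact hb ⟨h.1.1, h.1.2, h.2⟩
        have hstep : pvStepS cs sepL gapL (cols, pvFirst cs sepL lo k) k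
            = (cols, pvFirst cs sepL lo k) := by
          simp only [pvStepS]
          rw [if_neg ha, if_neg hb]
        have hfirst : pvFirst cs sepL lo (k + 1) = pvFirst cs sepL lo k := by
          rw [pvFirst_snoc cs sepL lo k hlok]
          cases hf : pvFirst cs sepL lo k with
          | some sv => simp
          | none =>
            have hsep : pvCharAt cs k sepL = false := by
              cases hsk : pvCharAt cs k sepL
              · rfl
              · exact absurd ⟨hf, hsk⟩ ha
            simp [hsep]
        rw [hstep, ← hfirst, ih (k + 1) lo cols (by omega) h0lo (by omega) hloprev]
        simp [hq]

-- strict mode when no close event can ever fire (sep = gap inside Pre_):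
-- the same invariant with the open segment anchored at 0
theorem pvMS0 (cs sepL gapL : List Char)
    (hnoq : ∀ i, pvQ cs sepL gapL i = false) :
    ∀ (m : Nat) (k : Int) (cols : List (Int × Int)),
    0 ≤ k → k + m = (cs.length : Int) →
    pvFin cs sepL ((PySem.List.pyRange k (cs.length : Int)).foldl (pvStepS cs sepL gapL)
        (cols, pvFirst cs sepL 0 k))
      = cols ++ pvBs cs sepL 0
          (((PySem.List.pyRange k (cs.length : Int)).filter (pvQ cs sepL gapL))
            ++ (if pvTail cs sepL = true then [(cs.length : Int)] else [])) := by
  intro m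
  induction m with
  | zero =>
    intro k cols hk0 hk
    have hkn : k = (cs.length : Int) := by omega
    subst hkn
    rw [PySem.List.pyRange_one_eq_nil (le_refl _)]
    by_cases ht : pvTail cs sepL = true
    · have ht' : cs ≠ [] ∧ pvCharAt cs (-1) sepL = true := by simpa [pvTail] using ht
      have hlast : pvCharAt cs ((cs.length : Int) - 1) sepL = true := by
        rw [← pvCharAt_neg_one cs sepL ht'.1]; exact ht'.2
      have hlen : 0 < cs.length := List.length_pos_iff.mpr ht'.1
      have hne : pvFirst cs sepL 0 (cs.length : Int) ≠ none :=
        pvFirst_mem cs sepL 0 _ ((cs.length : Int) - 1) (by omega) (by omega) hlast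
      obtain ⟨sv, hsv⟩ := Option.ne_none_iff_exists'.mp hne
      simp only [List.foldl_nil, List.filter_nil, List.nil_append, if_pos ht, pvFin]
      rw [if_pos ⟨ht'.1, ht'.2, by rw [hsv]; simp⟩]
      have hsv' := hsv
      simp only [pvFirst] at hsv'
      simp [pvBs, pvGet0, hsv', hsv]
    · have ht' : ¬(cs ≠ [] ∧ pvCharAt cs (-1) sepL = true ∧
          pvFirst cs sepL 0 (cs.length : Int) ≠ none) := by
        simp [pvTail] at ht
        intro h
        exact absurd (ht h.1) (by simp [h.2.1])
      simp only [List.foldl_nil, List.filter_nil, List.nil_append, if_neg ht, pvFin]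
      rw [if_neg ht']
      simp [pvBs]
  | succ m ih =>
    intro k cols hk0 hk
    have hkn : k < (cs.length : Int) := by omega
    rw [PySem.List.pyRange_one_cons hkn, List.foldl_cons, List.filter_cons]
    by_cases ha : pvFirst cs sepL 0 k = none ∧ pvCharAt cs k sepL = true
    · have hstep : pvStepS cs sepL gapL (cols, pvFirst cs sepL 0 k) k = (cols, some k) := by
        simp [pvStepS, ha.1, ha.2]
      have hfirst : pvFirst cs sepL 0 (k + 1) = some k := by
        rw [pvFirst_snoc cs sepL 0 k hk0, ha.1, if_pos ha.2]
        rfl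
      rw [hstep, ← hfirst, ih (k + 1) cols (by omega) (by omega)]
      simp [hnoq k]
    · have hb : ¬(0 < k ∧ pvCharAt cs k gapL = true ∧ pvCharAt cs (k - 1) sepL = true) := by
        intro h
        have := hnoq k
        simp [pvQ, h.1, h.2.1, h.2.2] at this
      have hstep : pvStepS cs sepL gapL (cols, pvFirst cs sepL 0 k) k
          = (cols, pvFirst cs sepL 0 k) := by
        simp only [pvStepS]
        rw [if_neg ha, if_neg hb]
      have hfirst : pvFirst cs sepL 0 (k + 1) = pvFirst cs sepL 0 k := by
        rw [pvFirst_snoc cs sepL 0 k hk0]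
        cases hf : pvFirst cs sepL 0 k with
        | some sv => simp
        | none =>
          have hsep : pvCharAt cs k sepL = false := by
            cases hsk : pvCharAt cs k sepL
            · rfl
            · exact absurd ⟨hf, hsk⟩ ha
          simp [hsep]
      rw [hstep, ← hfirst, ih (k + 1) cols (by omega) (by omega)]
      simp [hnoq k]

-- main loop invariant, non-strict mode
theorem pvMSn (cs sepL gapL : List Char) :
    ∀ (m : Nat) (k s0 : Int) (cols : List (Int × Int)),
    k + m = (cs.length : Int) →
    pvFin cs sepL ((PySem.List.pyRange k (cs.length : Int)).foldl (pvStepN cs sepL gapL)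
        (cols, some s0))
      = cols ++ pvNs s0
          (((PySem.List.pyRange k (cs.length : Int)).filter (pvQ cs sepL gapL))
            ++ (if pvTail cs sepL = true then [(cs.length : Int)] else [])) := by
  intro m
  induction m with
  | zero =>
    intro k s0 cols hk
    have hkn : k = (cs.length : Int) := by omega
    subst hkn
    rw [PySem.List.pyRange_one_eq_nil (le_refl _)]
    by_cases ht : pvTail cs sepL = true
    · have ht' : cs ≠ [] ∧ pvCharAt cs (-1) sepL = true := by
        simpa [pvTail] using ht
      simp only [List.foldl_nil, List.filter_nil, List.nil_append, if_pos ht, pvFin]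
      rw [if_pos ⟨ht'.1, ht'.2, by simp⟩]
      simp [pvNs]
    · have ht' : ¬(cs ≠ [] ∧ pvCharAt cs (-1) sepL = true ∧ (some s0 : Option Int) ≠ none) := by
        simp [pvTail] at ht
        intro h
        exact absurd (ht h.1) (by simp [h.2.1])
      simp only [List.foldl_nil, List.filter_nil, List.nil_append, if_neg ht, pvFin]
      rw [if_neg ht']
      simp [pvNs]
  | succ m ih =>
    intro k s0 cols hk
    have hkn : k < (cs.length : Int) := by omega
    rw [PySem.List.pyRange_one_cons hkn]
    rw [List.foldl_cons, List.filter_cons]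
    by_cases hb : 0 < k ∧ pvCharAt cs k gapL = true ∧ pvCharAt cs (k - 1) sepL = true
    · have hq : pvQ cs sepL gapL k = true := by
        simp [pvQ, hb.1, hb.2.1, hb.2.2]
      rw [show pvStepN cs sepL gapL (cols, some s0) k = (cols ++ [(s0, k - s0)], some k) from by
        simp [pvStepN, hb]]
      rw [ih (k + 1) k (cols ++ [(s0, k - s0)]) (by omega)]
      simp [hq, pvNs, List.append_assoc]
    · have hq : pvQ cs sepL gapL k = false := by
        by_contra h
        rw [Bool.not_eq_false] at h
        simp [pvQ] at h
        exact hb ⟨h.1.1, h.1.2, h.2⟩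
      rw [show pvStepN cs sepL gapL (cols, some s0) k = (cols, some s0) from by
        simp [pvStepN, hb]]
      rw [ih (k + 1) s0 cols (by omega)]
      simp [hq]


-- B's boundary list, rewritten with the guarded close predicate over [0, n)
theorem pvBridgeN (cs sepL gapL : List Char) :
    (((0 : Int) :: (PySem.List.pyRange 1 (cs.length : Int)).filter
        (fun i => pvCharAt cs i gapL && pvCharAt cs (i - 1) sepL)).zip
      (if (decide (cs ≠ []) && pvCharAt cs (-1) sepL) = true then
        (PySem.List.pyRange 1 (cs.length : Int)).filter
          (fun i => pvCharAt cs i gapL && pvCharAt cs (i - 1) sepL) ++ [(cs.length : Int)]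
       else (PySem.List.pyRange 1 (cs.length : Int)).filter
          (fun i => pvCharAt cs i gapL && pvCharAt cs (i - 1) sepL))).map
      (fun p => (p.1, p.2 - p.1))
    = pvNs 0 (((PySem.List.pyRange 0 (cs.length : Int)).filter (pvQ cs sepL gapL))
        ++ (if pvTail cs sepL = true then [(cs.length : Int)] else [])) := by
  rw [pvCloses]
  by_cases ht : pvTail cs sepL = true
  · rw [if_pos (show (decide (cs ≠ []) && pvCharAt cs (-1) sepL) = true from ht), if_pos ht]
    exact pvZipNs _ [(cs.length : Int)] 0 (by simp)
  · rw [if_neg (show ¬(decide (cs ≠ []) && pvCharAt cs (-1) sepL) = true from ht), if_neg ht]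
    simpa using pvZipNs _ [] 0 (by simp)

theorem pvBridgeS (cs sepL gapL : List Char) :
    pvBs cs sepL 0
      (if (decide (cs ≠ []) && pvCharAt cs (-1) sepL) = true then
        (PySem.List.pyRange 1 (cs.length : Int)).filter
          (fun i => pvCharAt cs i gapL && pvCharAt cs (i - 1) sepL) ++ [(cs.length : Int)]
       else (PySem.List.pyRange 1 (cs.length : Int)).filter
          (fun i => pvCharAt cs i gapL && pvCharAt cs (i - 1) sepL))
    = pvBs cs sepL 0 (((PySem.List.pyRange 0 (cs.length : Int)).filter (pvQ cs sepL gapL))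
        ++ (if pvTail cs sepL = true then [(cs.length : Int)] else [])) := by
  rw [pvCloses]
  by_cases ht : pvTail cs sepL = true
  · rw [if_pos (show (decide (cs ≠ []) && pvCharAt cs (-1) sepL) = true from ht), if_pos ht]
  · rw [if_neg (show ¬(decide (cs ≠ []) && pvCharAt cs (-1) sepL) = true from ht), if_neg ht]
    simp

-- ===== VERDICT (by name: the statement is the Claim_ definition above) =====
theorem find_columns_py_spec : Claim_equal_find_columns_py := by
  intro line sep gap strict hDom hPre
  unfold Spec_find_columns_py find_columns_py find_columns_py_alt
  by_cases hG : PySem.Str.stripChars (PySem.Str.replace (PySem.Str.replace line sep "X") gap "X") "X" ≠ ""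
  · rw [if_pos hG, if_pos hG]
  · rw [if_neg hG, if_neg hG]
    dsimp only
    rw [PySem.List.enumerate_eq_map_pyRange line.toList 'x', List.foldl_map]
    cases strict with
    | false =>
      rw [List.foldl_ext _ (pvStepN line.toList sep.toList gap.toList) _ (by
        intro st j hj
        obtain ⟨hj0, hjn⟩ := PySem.List.mem_pyRange_one.mp hj
        simp only [PySem.List.len] at hjn
        have hc : ([PySem.List.pyGetD line.toList j 'x'] = gap.toList)
            = (pvCharAt line.toList j gap.toList = true) :=
          pvCharAt_getD line.toList j 'x' gap.toList hj0 hjn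
        simp only [Bool.false_eq_true, if_false, hc, pvStepN])]
      simp only [Bool.false_eq_true, if_false, PySem.List.len]
      rw [pvBridgeN line.toList sep.toList gap.toList]
      have h := pvMSn line.toList sep.toList gap.toList line.toList.length 0 0 [] (by simp)
      simpa [pvFin] using h
    | true =>
      rw [List.foldl_ext _ (pvStepS line.toList sep.toList gap.toList) _ (by
        intro st j hj
        obtain ⟨hj0, hjn⟩ := PySem.List.mem_pyRange_one.mp hj
        simp only [PySem.List.len] at hjn
        have hcs : ([PySem.List.pyGetD line.toList j 'x'] = sep.toList)
            = (pvCharAt line.toList j sep.toList = true) :=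
          pvCharAt_getD line.toList j 'x' sep.toList hj0 hjn
        have hcg : ([PySem.List.pyGetD line.toList j 'x'] = gap.toList)
            = (pvCharAt line.toList j gap.toList = true) :=
          pvCharAt_getD line.toList j 'x' gap.toList hj0 hjn
        simp only [reduceIte, hcs, hcg, pvStepS])]
      simp only [reduceIte, PySem.List.len]
      rw [pvFoldB line.toList sep.toList]
      rw [pvBridgeS line.toList sep.toList gap.toList]
      rcases eq_or_ne sep gap with hsg | hsg
      · -- sep = gap (inside Pre_: sep is not a doubled one-char separator in line):
        -- no close event can ever fire
        have hnoq : ∀ i, pvQ line.toList sep.toList gap.toList i = false := by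
          intro i
          by_contra hq
          rw [Bool.not_eq_false] at hq
          simp [pvQ] at hq
          obtain ⟨⟨hi0, hgapi⟩, hsepi⟩ := hq
          obtain ⟨c, hc2, hgeq⟩ := pvCharAt_some line.toList gap.toList i (by omega) hgapi
          obtain ⟨c', hc1, hseq⟩ := pvCharAt_some line.toList sep.toList (i - 1) (by omega) hsepi
          have hgl : gap.toList = sep.toList := by rw [hsg]
          have hcc : c' = c := by
            have := hseq.symm.trans (hgl.symm.trans hgeq)
            simpa using this
          have hj1 : (1 : Nat) ≤ i.toNat := by omega
          have hc1' : line.toList[i.toNat - 1]? = some c := by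
            rw [show i.toNat - 1 = (i - 1).toNat from by omega, hc1, hcc]
          have hinf : [c, c] <:+: line.toList := pvAdj line.toList i.toNat c hj1 hc1' hc2
          have hlen : sep.toList.length = 1 := by rw [hseq, hcc]; rfl
          have hno : PySem.Str.isIn (sep ++ sep) line = false := hPre rfl hsg hlen
          have : PySem.Str.isIn (sep ++ sep) line = true := by
            refine (PySem.Str.isIn_iff_infix _ _).mpr ?_
            rw [String.toList_append, hseq, hcc]
            exact hinf
          rw [hno] at this
          cases this
        have h := pvMS0 line.toList sep.toList gap.toList hnoq line.toList.length 0 []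
          (le_refl 0) (by simp)
        simpa [pvFin, pvFirst_empty] using h
      · have hsg' : sep.toList ≠ gap.toList := fun h => hsg (String.toList_inj.mp h)
        have h := pvMS line.toList sep.toList gap.toList hsg' line.toList.length 0 0 []
          (by simp) (le_refl 0) (le_refl 0) (Or.inl rfl)
        simpa [pvFin, pvFirst_empty] using h
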